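-- pv_equiv track=rewrite | github.com/RohitMugalya/bio-practical | match_mismatch_score.py | match_mismatch_score
-- ===== SOURCE A (Python) =====
-- def match_mismatch_score(seq1, seq2, match_score=1, mismatch_penalty=-1):
--     """
--     Function to compute the match/mismatch score between two sequences.
--
--     Parameters:
--     - seq1: First sequence (string)
--     - seq2: Second sequence (string)
--     - match_score: Score for a match (default = 1)
--     - mismatch_penalty: Penalty for a mismatch (default = -1)
--
--     Returns:
--     - total_score: Total score based on match/mismatch
--     """
--     if len(seq1) != len(seq2):
--         raise ValueError("Sequences must be of equal length")
--
--     total_score = 0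
--
--     # Compare each base pair in the aligned sequences
--     for base1, base2 in zip(seq1, seq2):
--         if base1 == base2:
--             total_score += match_score  # Match score
--         else:
--             total_score += mismatch_penalty  # Mismatch penalty
--
--     return total_score
-- ===== SOURCE B (Python) =====
-- def match_mismatch_score(seq1, seq2, match_score=1, mismatch_penalty=-1):
--     if len(seq1) != len(seq2):
--         raise ValueError("Sequences must be of equal length")
--
--     def score(lo, hi):
--         # score of the aligned slice [lo, hi) by splitting at the midpoint
--         if hi - lo == 0:
--             return 0
--         if hi - lo == 1:
--             return match_score if seq1[lo] == seq2[lo] else mismatch_penalty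
--         mid = (lo + hi) // 2
--         return score(lo, mid) + score(mid, hi)
--
--     return score(0, len(seq1))
-- ===== Notes on version B (the rewrite author's own statement) =====
-- stated objective: alternative
-- what changed: B scores the alignment by divide-and-conquer: it recursively splits the index range at the midpoint and adds the scores of the two halves, instead of A's single left-to-right accumulation over zip; the unequal-length ValueError guard is kept.
import Mathlib
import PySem

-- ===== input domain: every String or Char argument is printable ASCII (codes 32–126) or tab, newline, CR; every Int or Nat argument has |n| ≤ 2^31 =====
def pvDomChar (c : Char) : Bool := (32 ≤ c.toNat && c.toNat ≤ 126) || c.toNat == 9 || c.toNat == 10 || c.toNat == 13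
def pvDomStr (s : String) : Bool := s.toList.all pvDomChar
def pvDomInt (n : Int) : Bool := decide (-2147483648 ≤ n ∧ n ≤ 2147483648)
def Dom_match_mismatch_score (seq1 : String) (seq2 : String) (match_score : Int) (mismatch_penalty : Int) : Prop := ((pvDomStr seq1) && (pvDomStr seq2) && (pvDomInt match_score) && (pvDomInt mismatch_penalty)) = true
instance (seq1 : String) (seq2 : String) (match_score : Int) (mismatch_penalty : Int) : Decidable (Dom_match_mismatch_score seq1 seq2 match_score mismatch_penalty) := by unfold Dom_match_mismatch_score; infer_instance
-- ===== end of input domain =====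

-- B scores the alignment by divide-and-conquer over index ranges (midpoint split) instead of A's left-to-right accumulation (objective: alternative).


-- ===== PORT A =====
-- for base1, base2 in zip(seq1, seq2): total_score += match_score / mismatch_penalty
def match_mismatch_score (seq1 : String) (seq2 : String) (match_score : Int) (mismatch_penalty : Int) : Int :=
  (List.zip seq1.toList seq2.toList).foldl
    (fun total_score (p : Char × Char) =>
      if p.1 == p.2 then total_score + match_score else total_score + mismatch_penalty) 0

-- ===== PORT B =====
-- def score(lo, hi): midpoint split; under the length guard both indices are in range,
-- so Python's seq[lo] is exact as List.getD with a dummy default.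
def mmsScore (s1 s2 : List Char) (ms mp : Int) (lo hi : Nat) : Int :=
  if hi - lo = 0 then 0
  else if hi - lo = 1 then
    (if s1.getD lo ' ' == s2.getD lo ' ' then ms else mp)
  else
    mmsScore s1 s2 ms mp lo ((lo + hi) / 2) + mmsScore s1 s2 ms mp ((lo + hi) / 2) hi
termination_by hi - lo
decreasing_by all_goals omega

def match_mismatch_score_alt (seq1 : String) (seq2 : String) (match_score : Int) (mismatch_penalty : Int) : Int :=
  mmsScore seq1.toList seq2.toList match_score mismatch_penalty 0 seq1.toList.length

-- ===== PRECONDITION & SPEC =====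
-- A raises ValueError when the sequences have different lengths; exactly those inputs are excluded.
def Pre_match_mismatch_score (seq1 : String) (seq2 : String) (match_score : Int) (mismatch_penalty : Int) : Prop :=
  seq1.toList.length = seq2.toList.length
instance (seq1 : String) (seq2 : String) (match_score : Int) (mismatch_penalty : Int) : Decidable (Pre_match_mismatch_score seq1 seq2 match_score mismatch_penalty) := by unfold Pre_match_mismatch_score; infer_instance
def pvWitness_match_mismatch_score : String × String × Int × Int := ("ACGT", "AGGT", 2, -3)

def Spec_match_mismatch_score (seq1 : String) (seq2 : String) (match_score : Int) (mismatch_penalty : Int) (out : Int) : Prop := out = match_mismatch_score_alt seq1 seq2 match_score mismatch_penalty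
instance (seq1 : String) (seq2 : String) (match_score : Int) (mismatch_penalty : Int) (out : Int) : Decidable (Spec_match_mismatch_score seq1 seq2 match_score mismatch_penalty out) := by unfold Spec_match_mismatch_score; infer_instance

-- ===== CLAIM (what is proved, stated in full; the proofs are below) =====
def Claim_equal_match_mismatch_score : Prop := ∀ (seq1 : String) (seq2 : String) (match_score : Int) (mismatch_penalty : Int), Dom_match_mismatch_score seq1 seq2 match_score mismatch_penalty → Pre_match_mismatch_score seq1 seq2 match_score mismatch_penalty → Spec_match_mismatch_score seq1 seq2 match_score mismatch_penalty (match_mismatch_score seq1 seq2 match_score mismatch_penalty)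

-- ===== LEMMAS AND PROOFS =====
-- Divide-and-conquer over [lo,hi) equals the sum of the per-index scores over range' lo (hi-lo).
theorem mmsScore_eq_sum (s1 s2 : List Char) (ms mp : Int) :
    ∀ (k lo hi : Nat), hi - lo = k →
      mmsScore s1 s2 ms mp lo hi
        = ((List.range' lo (hi - lo)).map
            (fun i => if s1.getD i ' ' == s2.getD i ' ' then ms else mp)).sum := by
  intro k
  induction k using Nat.strong_induction_on with
  | _ k ih =>
    intro lo hi hk
    rw [mmsScore]
    by_cases h0 : hi - lo = 0
    · simp [h0]
    · by_cases h1 : hi - lo = 1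
      · simp [h1]
      · have hmid1 : (lo + hi) / 2 - lo < k := by omega
        have hmid2 : hi - (lo + hi) / 2 < k := by omega
        rw [if_neg h0, if_neg h1,
            ih _ hmid1 lo ((lo + hi) / 2) rfl,
            ih _ hmid2 ((lo + hi) / 2) hi rfl]
        have hsplit : List.range' lo (hi - lo)
            = List.range' lo ((lo + hi) / 2 - lo) ++ List.range' ((lo + hi) / 2) (hi - (lo + hi) / 2) := by
          have := @List.range'_append lo ((lo + hi) / 2 - lo) (hi - (lo + hi) / 2) 1
          rw [show lo + 1 * ((lo + hi) / 2 - lo) = (lo + hi) / 2 by omega] at this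
          rw [show (lo + hi) / 2 - lo + (hi - (lo + hi) / 2) = hi - lo by omega] at this
          exact this.symm
        rw [hsplit, List.map_append, List.sum_append]

-- A's left fold equals the same sum of per-index scores.
theorem mmsFold_eq_sum (s1 s2 : List Char) (ms mp : Int)
    (h : s1.length = s2.length) :
    (List.zip s1 s2).foldl
      (fun t (p : Char × Char) => if p.1 == p.2 then t + ms else t + mp) 0
      = ((List.range' 0 s1.length).map
          (fun i => if s1.getD i ' ' == s2.getD i ' ' then ms else mp)).sum := by
  have hfold : ∀ (l : List (Char × Char)) (acc : Int),
      l.foldl (fun t (p : Char × Char) => if p.1 == p.2 then t + ms else t + mp) acc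
        = acc + (l.map (fun p : Char × Char => if p.1 == p.2 then ms else mp)).sum := by
    intro l
    induction l with
    | nil => simp
    | cons hd tl ihl =>
      intro acc
      simp only [List.foldl_cons, List.map_cons, List.sum_cons, ihl]
      by_cases hc : (hd.1 == hd.2) = true <;> simp [hc] <;> ring
  rw [hfold, zero_add]
  congr 1
  apply List.ext_getElem
  · simp [List.length_zip, h]
  · intro i h1 h2
    simp only [List.getElem_map, List.getElem_zip, List.getElem_range', Nat.one_mul, Nat.zero_add]
    have hi1 : i < s1.length := by simpa [List.length_zip, h] using h1
    have hi2 : i < s2.length := by omega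
    rw [List.getD_eq_getElem _ _ hi1, List.getD_eq_getElem _ _ hi2]

-- ===== VERDICT (by name: the statement is the Claim_ definition above) =====
theorem match_mismatch_score_spec : Claim_equal_match_mismatch_score := by
  intro seq1 seq2 ms mp _ hpre
  unfold Pre_match_mismatch_score at hpre
  unfold Spec_match_mismatch_score match_mismatch_score match_mismatch_score_alt
  rw [mmsFold_eq_sum _ _ _ _ hpre, mmsScore_eq_sum _ _ _ _ (seq1.toList.length - 0) 0 _ rfl]
  simp
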